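-- pv_equiv track=rewrite | github.com/Einar91/kattis | ptice/ptice.py | check_answere
-- ===== SOURCE A (Python) =====
-- def check_answere(correct_answere, sequence):
--     num_correct = 0
--     seq_len = len(sequence)
--     count = 0
--     for char in correct_answere:
--         if char == sequence[count]:
--             num_correct += 1
--         if count == seq_len-1:
--             count = 0
--         else:
--             count += 1
--     return num_correct
-- ===== SOURCE B (Python) =====
-- def check_answere(correct_answere, sequence):
--     # Grouped by residue class: one strided constant-target pass per position of `sequence`.
--     n = len(sequence)
--     total = 0
--     for r in range(n):
--         target = sequence[r]
--         total += sum(1 for i in range(r, len(correct_answere), n)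
--                      if correct_answere[i] == target)
--     return total
-- ===== Notes on version B (the rewrite author's own statement) =====
-- stated objective: alternative
-- what changed: B replaces A's single cyclic pass with per-residue strided passes: for each position r of sequence it scans indices r, r+n, r+2n, ... of correct_answere counting matches against the one fixed character sequence[r], summing over r.
-- crash fix: When sequence is empty and correct_answere is non-empty, A raises IndexError on sequence[0] while B's empty outer range naturally returns 0. — e.g. on check_answere("A", ""): A raises IndexError, B returns 0
import Mathlib
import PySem

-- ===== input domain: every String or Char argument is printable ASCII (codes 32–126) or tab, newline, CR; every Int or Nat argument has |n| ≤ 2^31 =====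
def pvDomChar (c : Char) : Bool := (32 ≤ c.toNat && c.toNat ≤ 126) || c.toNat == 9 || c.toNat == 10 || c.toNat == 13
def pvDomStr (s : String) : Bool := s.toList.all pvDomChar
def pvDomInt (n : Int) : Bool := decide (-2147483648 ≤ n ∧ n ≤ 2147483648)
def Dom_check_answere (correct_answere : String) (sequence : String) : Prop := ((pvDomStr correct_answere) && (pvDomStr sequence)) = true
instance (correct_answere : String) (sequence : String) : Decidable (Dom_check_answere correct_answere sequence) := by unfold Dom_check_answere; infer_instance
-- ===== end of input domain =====

-- B replaces A's single cyclic pass with one strided constant-target pass per residue class of the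
-- sequence index (an alternative decomposition of the same count, no speed claim).


-- ===== PORT A =====
-- A's cyclic loop; `none` marks the IndexError Python raises on sequence[count] when sequence is empty.
def checkLoopA (seqc : List Char) (chars : List Char) (num_correct : Int) (count : Int) : Option Int :=
  match chars with
  | [] => some num_correct
  | ch :: rest =>
    match PySem.List.pyGet? seqc count with
    | none => none
    | some c =>
      checkLoopA seqc rest (if ch == c then num_correct + 1 else num_correct)
        (if count = (seqc.length : Int) - 1 then 0 else count + 1)

def check_answere (correct_answere : String) (sequence : String) : Int :=
  (checkLoopA sequence.toList correct_answere.toList 0 0).getD 0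

-- ===== PORT B =====
-- inner line `sum(1 for i in range(r, len(correct_answere), n) if correct_answere[i] == target)`;
-- the generated indices are always in range, so pyGetD with a dummy default is exact here.
def strideCount (cs : List Char) (r : Int) (n : Int) (target : Char) : Int :=
  ((PySem.List.pyRange r (cs.length : Int) n).countP
    (fun i => PySem.List.pyGetD cs i ' ' == target) : Nat)

def check_answere_alt (correct_answere : String) (sequence : String) : Int :=
  let cs := correct_answere.toList
  let ss := sequence.toList
  let n : Int := (ss.length : Int)
  (PySem.List.pyRange 0 n 1).foldl
    (fun total r => total + strideCount cs r n (PySem.List.pyGetD ss r ' ')) 0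

-- ===== PRECONDITION & SPEC =====
-- Pre_ excludes exactly the inputs where A raises IndexError: empty sequence with non-empty answers.
def Pre_check_answere (correct_answere : String) (sequence : String) : Prop :=
  correct_answere = "" ∨ sequence ≠ ""
instance (correct_answere : String) (sequence : String) : Decidable (Pre_check_answere correct_answere sequence) := by unfold Pre_check_answere; infer_instance
def pvWitness_check_answere : String × String := ("ABAB", "AB")

-- When sequence is empty and correct_answere is non-empty, A raises IndexError on sequence[0]
-- while B's empty outer range naturally returns 0.
def Raises_check_answere (correct_answere : String) (sequence : String) : Prop :=
  correct_answere ≠ "" ∧ sequence = ""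
instance (correct_answere : String) (sequence : String) : Decidable (Raises_check_answere correct_answere sequence) := by unfold Raises_check_answere; infer_instance
def pvRaiseWitness_check_answere : String × String := ("A", "")
def pvRaiseWitnessOut_check_answere : Int := 0

def Spec_check_answere (correct_answere : String) (sequence : String) (out : Int) : Prop := out = check_answere_alt correct_answere sequence
instance (correct_answere : String) (sequence : String) (out : Int) : Decidable (Spec_check_answere correct_answere sequence out) := by unfold Spec_check_answere; infer_instance

-- ===== CLAIM (what is proved, stated in full; the proofs are below) =====
def Claim_equal_check_answere : Prop := ∀ (correct_answere : String) (sequence : String), Dom_check_answere correct_answere sequence → Pre_check_answere correct_answere sequence → Spec_check_answere correct_answere sequence (check_answere correct_answere sequence)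
def Claim_raises_check_answere : Prop := (∀ (correct_answere : String) (sequence : String), Dom_check_answere correct_answere sequence → Raises_check_answere correct_answere sequence → ¬ Pre_check_answere correct_answere sequence) ∧ (Dom_check_answere (pvRaiseWitness_check_answere.1) (pvRaiseWitness_check_answere.2) ∧ Raises_check_answere (pvRaiseWitness_check_answere.1) (pvRaiseWitness_check_answere.2) ∧ check_answere_alt (pvRaiseWitness_check_answere.1) (pvRaiseWitness_check_answere.2) = pvRaiseWitnessOut_check_answere)

-- ===== LEMMAS AND PROOFS =====

theorem pyRange_pos_cons (a b s : Int) (hs : 0 < s) (hab : a < b) :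
    PySem.List.pyRange a b s = a :: PySem.List.pyRange (a + s) b s := by
  rw [PySem.List.pyRange_of_pos _ _ hs, PySem.List.pyRange_of_pos _ _ hs]
  simp only [if_pos hab]
  have hd1 : 0 ≤ b - a - 1 := by omega
  have hq : 0 ≤ (b - a - 1) / s := Int.ediv_nonneg hd1 (le_of_lt hs)
  have hm : b - a + s - 1 = (b - a - 1) + 1 * s := by ring
  rw [hm, Int.add_mul_ediv_right _ _ (ne_of_gt hs)]
  have ht : ((b - a - 1) / s + 1).toNat = ((b - a - 1) / s).toNat + 1 := by omega
  rw [ht, List.range_succ_eq_map, List.map_cons, List.map_map]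
  congr 1
  · simp
  · split_ifs with h2
    · have he : b - (a + s) + s - 1 = b - a - 1 := by ring
      rw [he]
      refine List.map_congr_left (fun k _ => ?_)
      simp only [Function.comp]
      push_cast
      ring
    · have h0 : (b - a - 1) / s = 0 := Int.ediv_eq_zero_of_lt hd1 (by omega)
      simp [h0]


theorem pyRange_pos_shift (a b s : Int) (hs : 0 < s) :
    PySem.List.pyRange (a + 1) (b + 1) s = (PySem.List.pyRange a b s).map (· + 1) := by
  rw [PySem.List.pyRange_of_pos _ _ hs, PySem.List.pyRange_of_pos _ _ hs, List.map_map]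
  have he : b + 1 - (a + 1) + s - 1 = b - a + s - 1 := by ring
  rw [he]
  have hiff : (a + 1 < b + 1) ↔ (a < b) := by omega
  simp only [hiff]
  refine List.map_congr_left (fun k _ => ?_)
  simp only [Function.comp]
  ring


theorem strideCount_nil (r n : Int) (t : Char) (hr : 0 ≤ r) (hn : 0 < n) :
    strideCount [] r n t = 0 := by
  unfold strideCount
  rw [PySem.List.pyRange_of_pos _ _ hn]
  simp [show ¬ (r < (0:Int)) from by omega]

theorem strideCount_shift (c : Char) (cs : List Char) (r n : Int) (t : Char)
    (hr : 0 ≤ r) (hn : 0 < n) :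
    strideCount (c :: cs) (r + 1) n t = strideCount cs r n t := by
  unfold strideCount
  have hl : (((c :: cs).length : Nat) : Int) = (cs.length : Int) + 1 := by simp
  rw [hl, pyRange_pos_shift _ _ _ hn, List.countP_map]
  congr 1
  refine List.countP_congr (fun i hi => ?_)
  have h0 : 0 ≤ i := by
    rcases (PySem.List.mem_pyRange_iff_of_pos hn i).1 hi with ⟨h1, _, _⟩
    omega
  simp only [Function.comp]
  rw [PySem.List.pyGetD_of_nonneg _ _ (by omega : (0:Int) ≤ i + 1),
      PySem.List.pyGetD_of_nonneg _ _ h0]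
  have ht : (i + 1).toNat = i.toNat + 1 := by omega
  rw [ht, List.getD_cons_succ]

theorem strideCount_head (c : Char) (cs : List Char) (n : Int) (t : Char) (hn : 0 < n) :
    strideCount (c :: cs) 0 n t = (if c == t then 1 else 0) + strideCount cs (n - 1) n t := by
  unfold strideCount
  have hl : (((c :: cs).length : Nat) : Int) = (cs.length : Int) + 1 := by simp
  rw [hl, pyRange_pos_cons 0 _ _ hn (by positivity)]
  have hsh : PySem.List.pyRange (0 + n) ((cs.length : Int) + 1) n
      = (PySem.List.pyRange (n - 1) (cs.length : Int) n).map (· + 1) := by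
    have : (0 : Int) + n = (n - 1) + 1 := by ring
    rw [this, pyRange_pos_shift _ _ _ hn]
  rw [hsh, List.countP_cons, List.countP_map]
  have h0 : PySem.List.pyGetD (c :: cs) 0 ' ' = c := by
    rw [PySem.List.pyGetD_of_nonneg _ _ (le_refl 0)]
    rfl
  have hcong : List.countP ((fun i => PySem.List.pyGetD (c :: cs) i ' ' == t) ∘ (· + 1))
      (PySem.List.pyRange (n - 1) (cs.length : Int) n)
      = List.countP (fun i => PySem.List.pyGetD cs i ' ' == t)
      (PySem.List.pyRange (n - 1) (cs.length : Int) n) := by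
    refine List.countP_congr (fun i hi => ?_)
    have h0i : 0 ≤ i := by
      rcases (PySem.List.mem_pyRange_iff_of_pos hn i).1 hi with ⟨h1, _, _⟩
      omega
    simp only [Function.comp]
    rw [PySem.List.pyGetD_of_nonneg _ _ (by omega : (0:Int) ≤ i + 1),
        PySem.List.pyGetD_of_nonneg _ _ h0i]
    have ht : (i + 1).toNat = i.toNat + 1 := by omega
    rw [ht, List.getD_cons_succ]
  rw [hcong, h0]
  push_cast
  by_cases hc : c == t <;> simp [hc] <;> ring

def S (ss : List Char) (cs : List Char) (k : Int) : Int :=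
  ((PySem.List.pyRange 0 (ss.length : Int) 1).map
    (fun r => strideCount cs r (ss.length : Int)
      (PySem.List.pyGetD ss ((r + k) % (ss.length : Int)) ' '))).sum

theorem S_nil (ss : List Char) (k : Int) (hn : ss ≠ []) : S ss [] k = 0 := by
  unfold S
  have hn' : 0 < (ss.length : Int) := by
    have := List.length_pos_iff.2 hn
    exact_mod_cast this
  have : ∀ r ∈ PySem.List.pyRange 0 (ss.length : Int) 1,
      strideCount [] r (ss.length : Int)
        (PySem.List.pyGetD ss ((r + k) % (ss.length : Int)) ' ') = 0 := by
    intro r hr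
    rcases PySem.List.mem_pyRange_one.1 hr with ⟨h1, h2⟩
    exact strideCount_nil _ _ _ h1 hn'
  rw [List.map_congr_left this]
  simp

theorem emod_step (n k : Int) (hn : 0 < n) :
    (if k % n = n - 1 then (0 : Int) else k % n + 1) = (k + 1) % n := by
  have h0 : 0 ≤ k % n := Int.emod_nonneg _ (by omega)
  have h1 : k % n < n := Int.emod_lt_of_pos _ hn
  have hk : k + 1 = k % n + 1 + n * (k / n) := by
    have := Int.ediv_add_emod k n
    omega
  rw [hk, Int.add_mul_emod_self_left]
  split_ifs with h
  · rw [h]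
    simp [show n - 1 + 1 = n from by ring]
  · rw [Int.emod_eq_of_lt (show (0:Int) ≤ k % n + 1 by omega) (show k % n + 1 < n by omega)]

theorem pyRange_zero_snoc (n : Int) (hn : 0 < n) :
    PySem.List.pyRange 0 n 1 = PySem.List.pyRange 0 (n-1) 1 ++ [n-1] := by
  have h := PySem.List.pyRange_one_succ_right (a := 0) (b := n-1) (by omega)
  rw [show n - 1 + 1 = n from by ring] at h
  exact h

theorem pyRange_one_eq_map (n : Int) (hn : 0 < n) :
    PySem.List.pyRange 1 n 1 = (PySem.List.pyRange 0 (n-1) 1).map (· + 1) := by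
  have h := pyRange_pos_shift 0 (n-1) 1 one_pos
  rw [show (0:Int) + 1 = 1 from by ring, show n - 1 + 1 = n from by ring] at h
  exact h

theorem S_cons (ss : List Char) (c : Char) (cs : List Char) (k : Int)
    (hn : ss ≠ []) (hk : 0 ≤ k) :
    S ss (c :: cs) k =
      (if c == PySem.List.pyGetD ss (k % (ss.length : Int)) ' ' then 1 else 0)
        + S ss cs (k + 1) := by
  have hn' : 0 < (ss.length : Int) := by
    have := List.length_pos_iff.2 hn
    exact_mod_cast this
  unfold S
  conv_lhs => rw [PySem.List.pyRange_one_cons hn', List.map_cons, List.sum_cons]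
  simp only [zero_add]
  conv_lhs => rw [strideCount_head _ _ _ _ hn', pyRange_one_eq_map _ hn', List.map_map]
  have hcong : List.map
      ((fun r => strideCount (c :: cs) r (ss.length : Int)
        (PySem.List.pyGetD ss ((r + k) % (ss.length : Int)) ' ')) ∘ (· + 1))
      (PySem.List.pyRange 0 ((ss.length : Int) - 1) 1)
      = List.map (fun r => strideCount cs r (ss.length : Int)
        (PySem.List.pyGetD ss ((r + (k + 1)) % (ss.length : Int)) ' '))
      (PySem.List.pyRange 0 ((ss.length : Int) - 1) 1) := by
    refine List.map_congr_left (fun r hr => ?_)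
    rcases PySem.List.mem_pyRange_one.1 hr with ⟨h1, h2⟩
    simp only [Function.comp]
    rw [strideCount_shift _ _ _ _ _ h1 hn', show r + 1 + k = r + (k + 1) from by ring]
  rw [hcong]
  conv_rhs => rw [pyRange_zero_snoc _ hn', List.map_append, List.sum_append]
  simp only [List.map_cons, List.map_nil, List.sum_cons, List.sum_nil]
  rw [show (ss.length : Int) - 1 + (k + 1) = k + (ss.length : Int) * 1 from by ring,
      Int.add_mul_emod_self_left]
  ring


theorem checkLoopA_eq (ss : List Char) (hn : ss ≠ []) :
    ∀ (cs : List Char) (num k : Int), 0 ≤ k →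
      checkLoopA ss cs num (k % (ss.length : Int)) = some (num + S ss cs k) := by
  have hn' : 0 < (ss.length : Int) := by
    have := List.length_pos_iff.2 hn
    exact_mod_cast this
  intro cs
  induction cs with
  | nil =>
    intro num k hk
    rw [checkLoopA, S_nil ss k hn]
    simp
  | cons ch rest ih =>
    intro num k hk
    have h0 : 0 ≤ k % (ss.length : Int) := Int.emod_nonneg _ (by omega)
    have h1 : k % (ss.length : Int) < (ss.length : Int) := Int.emod_lt_of_pos _ hn'
    rw [checkLoopA]
    rw [PySem.List.pyGet?_eq_some_getElem ss h0 h1]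
    rw [emod_step _ _ hn']
    show checkLoopA ss rest (if ch == ss[(k % (ss.length : Int)).toNat] then num + 1 else num)
        ((k + 1) % (ss.length : Int)) = some (num + S ss (ch :: rest) k)
    rw [ih _ (k + 1) (by omega)]
    rw [S_cons ss ch rest k hn hk]
    have hg : PySem.List.pyGetD ss (k % (ss.length : Int)) ' '
        = ss[(k % (ss.length : Int)).toNat] :=
      PySem.List.pyGetD_eq_getElem _ _ h0 h1
    rw [hg]
    by_cases hc : ch == ss[(k % (ss.length : Int)).toNat] <;> simp [hc] <;> ring


theorem alt_eq_S (ca s : String) (hn : s.toList ≠ []) :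
    check_answere_alt ca s = S s.toList ca.toList 0 := by
  unfold check_answere_alt S
  rw [PySem.List.foldl_add]
  rw [zero_add]
  refine congrArg List.sum (List.map_congr_left fun r hr => ?_)
  rcases PySem.List.mem_pyRange_one.1 hr with ⟨h1, h2⟩
  rw [show r + 0 = r from by ring, Int.emod_eq_of_lt h1 h2]

theorem a_eq_b (ca s : String) (hpre : ca = "" ∨ s ≠ "") :
    check_answere ca s = check_answere_alt ca s := by
  by_cases hs : s.toList = []
  · have hs' : s = "" := String.toList_eq_nil_iff.mp hs
    rcases hpre with hca | hne
    · subst hca; subst hs'; decide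
    · exact absurd hs' hne
  · unfold check_answere
    have h := checkLoopA_eq s.toList hs ca.toList 0 0 le_rfl
    rw [Int.zero_emod] at h
    rw [h, alt_eq_S ca s hs]
    simp

-- ===== VERDICT (by name: the statement is the Claim_ definition above) =====
theorem check_answere_spec : Claim_equal_check_answere := by
  intro ca s _ hpre
  unfold Spec_check_answere
  exact a_eq_b ca s hpre

@[simp] theorem check_answere_raises : Claim_raises_check_answere := by
  unfold Claim_raises_check_answere
  exact ⟨by intro ca s _ ⟨h1, h2⟩ hp; rcases hp with h | h <;> simp_all, by decide⟩
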